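-- pv_equiv track=rewrite | github.com/palilo815/ps | baekjoon/8000/8320.py | yaksu
-- ===== SOURCE A (Python) =====
-- def yaksu(n):
--     ret = 0
--     i = 1
--     while i * i <= n:
--         if n % i == 0:
--             ret += 1
--         i += 1
--     return ret
-- ===== SOURCE B (Python) =====
-- def yaksu(n):
--     if n <= 0:
--         return 0
--     m = n
--     d = 1
--     p = 2
--     while p * p <= m:
--         if m % p == 0:
--             e = 0
--             while m % p == 0:
--                 m //= p
--                 e += 1
--             d *= e + 1
--         p += 1
--     if m > 1:
--         d *= 2
--     return (d + 1) // 2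
-- ===== Notes on version B (the rewrite author's own statement) =====
-- stated objective: alternative
-- what changed: Instead of testing every candidate up to sqrt(n) and counting divisors directly, B factorizes n by trial division (dividing out each prime found, so the bound sqrt(m) shrinks as m does), computes the full divisor count d(n) as the product of (exponent+one) over the prime exponents, and returns half of d(n) rounded up, which equals the number of divisors not exceeding sqrt(n) because divisors pair up around sqrt(n).
import Mathlib
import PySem

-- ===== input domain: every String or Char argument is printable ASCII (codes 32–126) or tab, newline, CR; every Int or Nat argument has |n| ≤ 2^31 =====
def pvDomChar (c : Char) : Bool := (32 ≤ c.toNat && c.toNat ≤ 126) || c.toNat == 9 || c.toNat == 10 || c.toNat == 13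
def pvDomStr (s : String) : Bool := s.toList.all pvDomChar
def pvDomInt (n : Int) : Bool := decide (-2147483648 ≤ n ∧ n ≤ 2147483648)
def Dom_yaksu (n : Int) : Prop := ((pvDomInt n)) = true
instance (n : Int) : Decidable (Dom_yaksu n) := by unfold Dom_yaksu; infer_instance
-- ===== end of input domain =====

-- B counts divisors ≤ √n through the prime factorization of n (trial division + the pairing
-- of divisors around √n) instead of A's per-candidate counting loop; same return value, different algorithm.

-- ===== PORT A =====
-- 'ret = 0; i = 1; while i * i <= n: if n % i == 0: ret += 1; i += 1; return ret'
-- (the fuel only makes the recursion total in Lean; with fuel = n.toNat + 1 it is never exhausted)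
def yaksuLoop (n ret i : Int) (fuel : Nat) : Int :=
  match fuel with
  | 0 => ret
  | f + 1 =>
    if i * i ≤ n then
      yaksuLoop n (if PySem.Int.mod n i = 0 then ret + 1 else ret) (i + 1) f
    else ret

def yaksu (n : Int) : Int := yaksuLoop n 0 1 (n.toNat + 1)

-- ===== PORT B =====
-- inner 'while m % p == 0: m //= p; e += 1', returning the final (m, e)
-- (the fuel only makes the recursion total in Lean; on the actual calls, fuel = m.toNat, it is never exhausted)
def yaksuStrip (m p e : Int) (fuel : Nat) : Int × Int :=
  match fuel with
  | 0 => (m, e)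
  | f + 1 =>
    if PySem.Int.mod m p = 0 then yaksuStrip (PySem.Int.floordiv m p) p (e + 1) f
    else (m, e)

-- outer 'while p * p <= m: …; p += 1', carrying the loop state (m, d)
def yaksuFact (m d p : Int) (fuel : Nat) : Int × Int :=
  match fuel with
  | 0 => (m, d)
  | f + 1 =>
    if p * p ≤ m then
      if PySem.Int.mod m p = 0 then
        let r := yaksuStrip m p 0 m.toNat
        yaksuFact r.1 (d * (r.2 + 1)) (p + 1) f
      else yaksuFact m d (p + 1) f
    else (m, d)

def yaksu_alt (n : Int) : Int :=
  if n ≤ 0 then 0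
  else
    let r := yaksuFact n 1 2 (n.toNat + 1)
    let d := if 1 < r.1 then r.2 * 2 else r.2
    PySem.Int.floordiv (d + 1) 2

-- ===== PRECONDITION & SPEC =====
def Spec_yaksu (n : Int) (out : Int) : Prop := out = yaksu_alt n
instance (n : Int) (out : Int) : Decidable (Spec_yaksu n out) := by unfold Spec_yaksu; infer_instance

-- ===== CLAIM (what is proved, stated in full; the proofs are below) =====
def Claim_equal_yaksu : Prop := ∀ (n : Int), Dom_yaksu n → Spec_yaksu n (yaksu n)

-- ===== LEMMAS AND PROOFS =====

-- A's loop counts the divisors of n.toNat lying in [i.toNat, √(n.toNat)]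
theorem icc_filter_empty (n i : Int) (hi1 : 1 ≤ i) (h : ¬ i * i ≤ n) :
    (Finset.Icc i.toNat (Nat.sqrt n.toNat)).filter (· ∣ n.toNat) = ∅ := by
  apply Finset.filter_eq_empty_iff.mpr
  intro j hj
  rw [Finset.mem_Icc] at hj
  intro _
  have hgt : Nat.sqrt n.toNat < i.toNat := by
    rcases lt_or_ge n 0 with hn | hn
    · have : n.toNat = 0 := by omega
      rw [this]
      simp only [Nat.sqrt_zero]
      omega
    · rw [Nat.sqrt_lt']
      have h2 : (n.toNat : Int) < (i.toNat : Int) * (i.toNat : Int) := by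
        rw [Int.toNat_of_nonneg (by omega : (0:Int) ≤ i), Int.toNat_of_nonneg hn]; omega
      rw [pow_two]
      exact_mod_cast h2
  omega

theorem yaksuLoop_count (n : Int) : ∀ (fuel : Nat) (ret i : Int), 1 ≤ i →
    (n + 1 - i).toNat ≤ fuel →
    yaksuLoop n ret i fuel =
      ret + (((Finset.Icc i.toNat (Nat.sqrt n.toNat)).filter (· ∣ n.toNat)).card : Int) := by
  intro fuel
  induction fuel with
  | zero =>
    intro ret i hi1 hf
    have hii : i ≤ i * i := le_mul_of_one_le_left (by omega) hi1
    have hcond : ¬ i * i ≤ n := by omega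
    rw [yaksuLoop, icc_filter_empty n i hi1 hcond]
    simp
  | succ f ih =>
    intro ret i hi1 hf
    rw [yaksuLoop]
    by_cases h : i * i ≤ n
    · rw [if_pos h]
      rw [ih _ (i + 1) (by omega) (by omega)]
      have hn0 : 0 ≤ n := le_trans (mul_self_nonneg i) h
      have hle : i.toNat ≤ Nat.sqrt n.toNat := by
        rw [Nat.le_sqrt]
        have h2 : (i.toNat : Int) * i.toNat ≤ (n.toNat : Int) := by
          rw [Int.toNat_of_nonneg (by omega : (0:Int) ≤ i), Int.toNat_of_nonneg hn0]; exact h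
        exact_mod_cast h2
      have hicc : Finset.Icc i.toNat (Nat.sqrt n.toNat) =
          insert i.toNat (Finset.Icc (i + 1).toNat (Nat.sqrt n.toNat)) := by
        ext j
        simp only [Finset.mem_insert, Finset.mem_Icc]
        omega
      have hnotmem : i.toNat ∉ Finset.Icc (i + 1).toNat (Nat.sqrt n.toNat) := by
        simp only [Finset.mem_Icc]; omega
      have hdvd : PySem.Int.mod n i = 0 ↔ i.toNat ∣ n.toNat := by
        rw [PySem.Int.mod_eq_zero_iff_dvd]
        constructor
        · intro hd
          have : (i.toNat : Int) ∣ (n.toNat : Int) := by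
            rwa [Int.toNat_of_nonneg (by omega : (0:Int) ≤ i), Int.toNat_of_nonneg hn0]
          exact_mod_cast this
        · intro hd
          have : (i.toNat : Int) ∣ (n.toNat : Int) := Int.natCast_dvd_natCast.mpr hd
          rwa [Int.toNat_of_nonneg (by omega : (0:Int) ≤ i), Int.toNat_of_nonneg hn0] at this
      rw [hicc, Finset.filter_insert]
      by_cases hc : i.toNat ∣ n.toNat
      · rw [if_pos hc, Finset.card_insert_of_notMem (fun hmem => hnotmem (Finset.mem_filter.mp hmem).1)]
        rw [if_pos (hdvd.mpr hc)]
        push_cast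
        ring
      · rw [if_neg hc, if_neg (fun h' => hc (hdvd.mp h'))]
    · rw [if_neg h, icc_filter_empty n i hi1 h]
      simp

-- the inner strip loop divides out the full power of p
theorem yaksuStrip_spec : ∀ (fuel : Nat) (m p e : Int), 0 < m → 2 ≤ p → m.toNat ≤ fuel →
    ∃ k : Nat, yaksuStrip m p e fuel = (((m.toNat / p.toNat ^ k : Nat) : Int), e + k) ∧
      p.toNat ^ k ∣ m.toNat ∧ ¬ p.toNat ∣ m.toNat / p.toNat ^ k := by
  intro fuel
  induction fuel with
  | zero => intro m p e hm hp hf; omega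
  | succ f ih =>
    intro m p e hm hp hf
    rw [yaksuStrip]
    by_cases hdvd : PySem.Int.mod m p = 0
    · rw [if_pos hdvd]
      have hpdvd : p ∣ m := (PySem.Int.mod_eq_zero_iff_dvd m p).mp hdvd
      obtain ⟨c, hc⟩ := hpdvd
      have hppos : (0:Int) < p := by omega
      have hcpos : 0 < c := by
        rcases lt_trichotomy c 0 with h0 | h0 | h0
        · nlinarith
        · subst h0; simp at hc; omega
        · exact h0
      have hfd : PySem.Int.floordiv m p = c := by
        rw [PySem.Int.floordiv_eq_ediv_of_pos hppos, hc, Int.mul_ediv_cancel_left c (by omega)]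
      have hMnat : m.toNat = p.toNat * c.toNat := by
        have : ((p.toNat * c.toNat : Nat) : Int) = (m.toNat : Int) := by
          push_cast
          rw [Int.toNat_of_nonneg (by omega), Int.toNat_of_nonneg (by omega),
            Int.toNat_of_nonneg (by omega), ← hc]
        exact_mod_cast this.symm
      have hclt : c.toNat ≤ f := by
        have h2 : 2 ≤ p.toNat := by omega
        have hc1 : 1 ≤ c.toNat := by omega
        nlinarith [hMnat, hf]
      obtain ⟨k', hres, hdv, hnd⟩ := ih c p (e + 1) hcpos hp hclt
      refine ⟨k' + 1, ?_, ?_, ?_⟩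
      · rw [hfd, hres]
        have hdiv : c.toNat / p.toNat ^ k' = m.toNat / p.toNat ^ (k' + 1) := by
          rw [hMnat, pow_succ, mul_comm (p.toNat ^ k') p.toNat, Nat.mul_div_mul_left _ _ (by omega)]
        rw [hdiv]
        have : e + 1 + (k' : Int) = e + ((k' + 1 : Nat) : Int) := by push_cast; ring
        rw [this]
      · rw [hMnat, pow_succ, mul_comm (p.toNat ^ k') p.toNat]
        exact mul_dvd_mul_left p.toNat hdv
      · have hdiv : m.toNat / p.toNat ^ (k' + 1) = c.toNat / p.toNat ^ k' := by
          rw [hMnat, pow_succ, mul_comm (p.toNat ^ k') p.toNat, Nat.mul_div_mul_left _ _ (by omega)]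
        rw [hdiv]
        exact hnd
    · rw [if_neg hdvd]
      refine ⟨0, ?_, ?_, ?_⟩
      · simp [Int.toNat_of_nonneg (le_of_lt hm)]
      · simp
      · simp only [pow_zero, Nat.div_one]
        intro hP
        apply hdvd
        rw [PySem.Int.mod_eq_zero_iff_dvd]
        have : (p.toNat : Int) ∣ (m.toNat : Int) := Int.natCast_dvd_natCast.mpr hP
        rwa [Int.toNat_of_nonneg (by omega), Int.toNat_of_nonneg (by omega)] at this

-- no divisor in [2, P) and M < P² ⇒ M prime
theorem prime_of_no_small_divisor {M P : Nat} (hM : 2 ≤ M)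
    (hinv : ∀ q : Nat, 2 ≤ q → q < P → ¬ q ∣ M) (hP : M < P * P) : M.Prime := by
  by_contra hnp
  have h1 := Nat.minFac_dvd M
  have h2 := Nat.minFac_sq_le_self (by omega) hnp
  have h3 : 2 ≤ M.minFac := (Nat.minFac_prime (by omega)).two_le
  have h4 : ¬ M.minFac < P := fun hlt => hinv _ h3 hlt h1
  have : P * P ≤ M := by
    calc P * P ≤ M.minFac * M.minFac := Nat.mul_le_mul (by omega) (by omega)
    _ ≤ M := by nlinarith [h2]
  omega

-- the smallest divisor P ≥ 2 of M is prime
theorem prime_of_min_divisor {M P : Nat} (hP : 2 ≤ P) (hd : P ∣ M)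
    (hinv : ∀ q : Nat, 2 ≤ q → q < P → ¬ q ∣ M) : P.Prime := by
  rw [Nat.prime_def_lt]
  refine ⟨hP, fun q hq hqP => ?_⟩
  by_contra hne
  have h2 : 2 ≤ q := by
    rcases Nat.eq_zero_or_pos q with h | h
    · subst h
      rw [Nat.zero_dvd] at hqP
      omega
    · omega
  exact hinv q h2 hq (hqP.trans hd)

-- the outer loop accumulates the full divisor count d(M) = ∏(eᵢ+1)
theorem yaksuFact_spec : ∀ (fuel : Nat) (m d p : Int), 0 < m → 2 ≤ p →
    (∀ q : Nat, 2 ≤ q → (q : Int) < p → ¬ q ∣ m.toNat) →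
    m.toNat + 1 ≤ fuel + p.toNat →
    (if 1 < (yaksuFact m d p fuel).1 then (yaksuFact m d p fuel).2 * 2
     else (yaksuFact m d p fuel).2) = d * (m.toNat.divisors.card : Int) := by
  intro fuel
  induction fuel with
  | zero =>
    intro m d p hm hp hinv hf
    have hm1 : m = 1 := by
      by_contra hne
      have h2 : 2 ≤ m.toNat := by omega
      exact hinv m.toNat h2 (by omega) dvd_rfl
    subst hm1
    rw [yaksuFact]
    norm_num [Nat.divisors_one]
  | succ f ih =>
    intro m d p hm hp hinv hf
    rw [yaksuFact]
    by_cases hcond : p * p ≤ m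
    · rw [if_pos hcond]
      by_cases hdvd : PySem.Int.mod m p = 0
      · rw [if_pos hdvd]
        simp only
        obtain ⟨k, hres, hpk, hnd⟩ := yaksuStrip_spec m.toNat m p 0 hm hp (le_refl _)
        rw [hres]
        simp only
        set P := p.toNat with hP
        set M := m.toNat with hM
        set M' := M / P ^ k with hM'
        have hPdvd : P ∣ M := by
          have hpd : p ∣ m := (PySem.Int.mod_eq_zero_iff_dvd m p).mp hdvd
          have : (P : Int) ∣ (M : Int) := by
            rwa [hP, hM, Int.toNat_of_nonneg (by omega), Int.toNat_of_nonneg (by omega)]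
          exact_mod_cast this
        have hk1 : 1 ≤ k := by
          by_contra hk0
          have hk : k = 0 := by omega
          simp only [hM', hk, pow_zero, Nat.div_one] at hnd
          exact hnd hPdvd
        have hPp : P.Prime := prime_of_min_divisor (by omega) hPdvd
          (fun q h2 hq => hinv q h2 (by omega))
        have hM'pos : 0 < M' := Nat.div_pos (Nat.le_of_dvd (by omega) hpk) (Nat.pow_pos (by omega))
        have hMeq : M = P ^ k * M' := (Nat.mul_div_cancel' hpk).symm
        have hM'dvd : M' ∣ M := ⟨P ^ k, by rw [hMeq]; ring⟩
        have hM'lt : M' < M := by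
          rw [hM']
          exact Nat.div_lt_self (by omega) (Nat.one_lt_pow (by omega) (by omega))
        have htoNat : ((M' : Int)).toNat = M' := Int.toNat_natCast M'
        have hinv' : ∀ q : Nat, 2 ≤ q → (q : Int) < p + 1 → ¬ q ∣ ((M' : Int)).toNat := by
          intro q h2 hq hqd
          rw [htoNat] at hqd
          rcases lt_or_eq_of_le (show (q : Int) ≤ p by omega) with hlt | heq
          · exact hinv q h2 hlt (hqd.trans hM'dvd)
          · have : q = P := by rw [hP]; omega
            rw [this] at hqd
            exact hnd hqd
        have hres2 := ih (M' : Int) (d * ((0 : Int) + k + 1)) (p + 1)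
          (by exact_mod_cast hM'pos) (by omega) hinv' (by rw [htoNat]; omega)
        rw [hres2, htoNat]
        have hcard : M.divisors.card = (k + 1) * M'.divisors.card := by
          rw [hMeq, Nat.Coprime.card_divisors_mul, Nat.divisors_prime_pow hPp,
            Finset.card_map, Finset.card_range]
          exact ((Nat.Prime.coprime_iff_not_dvd hPp).mpr hnd).pow_left k
        rw [hcard]
        push_cast
        ring
      · rw [if_neg hdvd]
        have hinv' : ∀ q : Nat, 2 ≤ q → (q : Int) < p + 1 → ¬ q ∣ m.toNat := by
          intro q h2 hq hqd
          rcases lt_or_eq_of_le (show (q : Int) ≤ p by omega) with hlt | heq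
          · exact hinv q h2 hlt hqd
          · apply hdvd
            rw [PySem.Int.mod_eq_zero_iff_dvd, ← heq]
            have : (q : Int) ∣ (m.toNat : Int) := Int.natCast_dvd_natCast.mpr hqd
            rwa [Int.toNat_of_nonneg (by omega)] at this
        exact ih m d (p + 1) hm (by omega) hinv' (by omega)
    · rw [if_neg hcond]
      by_cases hm1 : m = 1
      · subst hm1
        norm_num [Nat.divisors_one]
      · have h2 : 2 ≤ m.toNat := by omega
        have hPp : m.toNat.Prime := by
          apply prime_of_no_small_divisor (P := p.toNat) h2 (fun q hq hqp => hinv q hq (by omega))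
          have : (m.toNat : Int) < (p.toNat : Int) * (p.toNat : Int) := by
            rw [Int.toNat_of_nonneg (by omega), Int.toNat_of_nonneg (by omega)]
            omega
          exact_mod_cast this
        rw [if_pos (by omega : (1:Int) < m)]
        rw [Nat.Prime.divisors hPp]
        rw [Finset.card_insert_of_notMem (by simp [hPp.ne_one.symm]), Finset.card_singleton]
        push_cast
        ring

-- a divisor i of M with M < i² has a cofactor M/i with (M/i)² < M …
theorem cofactor_flip {M i : Nat} (hd : i ∣ M) (hM : 0 < M) (h : M < i * i) :
    (M / i) * (M / i) < M := by
  obtain ⟨c, hc⟩ := hd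
  have hipos : 0 < i := by
    rcases Nat.eq_zero_or_pos i with h0 | h0
    · subst h0; simp at hc; omega
    · exact h0
  have hcd : M / i = c := by rw [hc]; exact Nat.mul_div_cancel_left c hipos
  rw [hcd]
  by_contra hcon
  push Not at hcon
  nlinarith [hc, h, hcon, hM]

-- … and conversely
theorem cofactor_flip' {M j : Nat} (hd : j ∣ M) (hM : 0 < M) (h : j * j < M) :
    M < (M / j) * (M / j) := by
  obtain ⟨c, hc⟩ := hd
  have hjpos : 0 < j := by
    rcases Nat.eq_zero_or_pos j with h0 | h0
    · subst h0; simp at hc; omega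
    · exact h0
  have hcd : M / j = c := by rw [hc]; exact Nat.mul_div_cancel_left c hjpos
  have hcpos : 0 < c := by
    rcases Nat.eq_zero_or_pos c with h0 | h0
    · subst h0; omega
    · exact h0
  rw [hcd]
  by_contra hcon
  push Not at hcon
  nlinarith [hc, h, hcon, hcpos]

-- pairing divisors around √M: those with i² ≤ M number (d(M)+1)/2
theorem card_small_divisors (M : Nat) (hM : 0 < M) :
    (M.divisors.card + 1) / 2 = (M.divisors.filter (fun i => i * i ≤ M)).card := by
  classical
  set D := M.divisors with hD
  have key : ∀ i ∈ D, 0 < i ∧ i ∣ M ∧ M / i ∈ D := by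
    intro i hi
    rw [hD, Nat.mem_divisors] at hi
    refine ⟨Nat.pos_of_dvd_of_pos hi.1 hM, hi.1, ?_⟩
    rw [hD, Nat.mem_divisors]
    exact ⟨Nat.div_dvd_of_dvd hi.1, by omega⟩
  have hLT : (D.filter (fun i => ¬ i * i ≤ M)).card = (D.filter (fun i => i * i < M)).card := by
    apply Finset.card_bij' (fun i _ => M / i) (fun j _ => M / j)
    · intro i hi
      rw [Finset.mem_filter] at hi ⊢
      obtain ⟨hiD, hilt⟩ := hi
      obtain ⟨hp, hdvd, hmem⟩ := key i hiD
      exact ⟨hmem, cofactor_flip hdvd hM (by omega)⟩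
    · intro j hj
      rw [Finset.mem_filter] at hj ⊢
      obtain ⟨hjD, hjlt⟩ := hj
      obtain ⟨hp, hdvd, hmem⟩ := key j hjD
      exact ⟨hmem, by have := cofactor_flip' hdvd hM hjlt; omega⟩
    · intro i hi
      rw [Finset.mem_filter] at hi
      exact Nat.div_div_self (key i hi.1).2.1 (by omega)
    · intro j hj
      rw [Finset.mem_filter] at hj
      exact Nat.div_div_self (key j hj.1).2.1 (by omega)
  have hSplit := Finset.card_filter_add_card_filter_not (s := D) (p := fun i => i * i ≤ M)
  have hS : (D.filter (fun i => i * i ≤ M)).card =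
      (D.filter (fun i => i * i < M)).card + (D.filter (fun i => i * i = M)).card := by
    rw [← Finset.card_union_of_disjoint, ← Finset.filter_or]
    · apply congrArg Finset.card
      apply Finset.filter_congr
      intro i _
      constructor
      · intro h; omega
      · intro h; omega
    · rw [Finset.disjoint_filter]
      intro i _ h1 h2
      omega
  have hE : (D.filter (fun i => i * i = M)).card ≤ 1 := by
    have hsub : (D.filter (fun i => i * i = M)) ⊆ {Nat.sqrt M} := by
      intro i hi
      rw [Finset.mem_filter] at hi
      rw [Finset.mem_singleton, ← hi.2, Nat.sqrt_eq]
    calc _ ≤ ({Nat.sqrt M} : Finset Nat).card := Finset.card_le_card hsub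
    _ = 1 := Finset.card_singleton _
  omega

-- the set A's loop filters over is the set of small divisors
theorem icc_filter_eq (M : Nat) :
    (Finset.Icc 1 (Nat.sqrt M)).filter (· ∣ M) = M.divisors.filter (fun i => i * i ≤ M) := by
  ext i
  simp only [Finset.mem_filter, Finset.mem_Icc, Nat.mem_divisors, Nat.le_sqrt]
  constructor
  · rintro ⟨⟨h1, h2⟩, h3⟩
    have : 1 ≤ i * i := Nat.mul_le_mul h1 h1
    exact ⟨⟨h3, by omega⟩, h2⟩
  · rintro ⟨⟨h1, h2⟩, h3⟩
    have hi : i ≠ 0 := fun h => h2 (by simpa [h] using h1)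
    exact ⟨⟨by omega, h3⟩, h1⟩

-- ===== VERDICT (by name: the statement is the Claim_ definition above) =====
theorem yaksu_spec : Claim_equal_yaksu := by
  intro n _
  unfold Spec_yaksu
  by_cases hn : n ≤ 0
  · rw [yaksu, yaksuLoop, if_neg (by omega : ¬ (1:Int) * 1 ≤ n), yaksu_alt, if_pos hn]
  · push Not at hn
    rw [yaksu, yaksuLoop_count n (n.toNat + 1) 0 1 (by omega) (by omega), yaksu_alt, if_neg (by omega)]
    simp only
    have hfact := yaksuFact_spec (n.toNat + 1) n 1 2 hn (by omega)
      (fun q h2 hq _ => by omega) (by omega)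
    rw [hfact]
    have hcast : (1 : Int) * (n.toNat.divisors.card : Int) + 1 =
        ((n.toNat.divisors.card + 1 : Nat) : Int) := by push_cast; ring
    rw [hcast]
    have hdiv2 : PySem.Int.floordiv (((n.toNat.divisors.card + 1 : Nat)) : Int) 2 =
        ((((n.toNat.divisors.card + 1) / 2 : Nat)) : Int) := by
      exact_mod_cast PySem.Int.floordiv_natCast (n.toNat.divisors.card + 1) 2
    rw [hdiv2]
    rw [card_small_divisors n.toNat (by omega), ← icc_filter_eq]
    norm_num
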